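-- pv_equiv track=rewrite | github.com/aayc/finances | beancount_utils.py | categorize_accounts
-- ===== SOURCE A (Python) =====
-- from typing import Any, Dict, List, Optional, Tuple, Union
--
-- ACCOUNT_TYPES = {
--     "ASSETS": "Assets:",
--     "LIABILITIES": "Liabilities:",
--     "INCOME": "Income:",
--     "EXPENSES": "Expenses:",
--     "EQUITY": "Equity:",
-- }
--
-- def categorize_accounts(accounts: List[str]) -> Dict[str, List[str]]:
--     """Categorize accounts for better organization.
--
--     Args:
--         accounts: List of account names
--
--     Returns:
--         Dictionary mapping category names to lists of accounts
--     """
--     categories: Dict[str, List[str]] = {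
--         "Assets": [],
--         "Liabilities": [],
--         "Income": [],
--         "Expenses": [],
--         "Equity": [],
--     }
--
--     for account in accounts:
--         if account.startswith(ACCOUNT_TYPES["ASSETS"]):
--             categories["Assets"].append(account)
--         elif account.startswith(ACCOUNT_TYPES["LIABILITIES"]):
--             categories["Liabilities"].append(account)
--         elif account.startswith(ACCOUNT_TYPES["INCOME"]):
--             categories["Income"].append(account)
--         elif account.startswith(ACCOUNT_TYPES["EXPENSES"]):
--             categories["Expenses"].append(account)
--         elif account.startswith(ACCOUNT_TYPES["EQUITY"]):
--             categories["Equity"].append(account)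
--
--     return categories
-- ===== SOURCE B (Python) =====
-- ACCOUNT_TYPES = {
--     "ASSETS": "Assets:",
--     "LIABILITIES": "Liabilities:",
--     "INCOME": "Income:",
--     "EXPENSES": "Expenses:",
--     "EQUITY": "Equity:",
-- }
--
-- def categorize_accounts(accounts):
--     """Categorize accounts by top-level category prefix.
--
--     One filter pass per category: the five prefixes are mutually exclusive,
--     so per-category filtering matches the elif chain exactly.
--     """
--     return {
--         cat: [a for a in accounts if a.startswith(cat + ":")]
--         for cat in ("Assets", "Liabilities", "Income", "Expenses", "Equity")
--     }
-- ===== Notes on version B (the rewrite author's own statement) =====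
-- stated objective: idiomatic
-- what changed: Replaces the single-pass elif chain mutating a pre-built dict with a dict comprehension that filters the account list once per category (valid because the five prefixes are mutually exclusive).
import Mathlib
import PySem

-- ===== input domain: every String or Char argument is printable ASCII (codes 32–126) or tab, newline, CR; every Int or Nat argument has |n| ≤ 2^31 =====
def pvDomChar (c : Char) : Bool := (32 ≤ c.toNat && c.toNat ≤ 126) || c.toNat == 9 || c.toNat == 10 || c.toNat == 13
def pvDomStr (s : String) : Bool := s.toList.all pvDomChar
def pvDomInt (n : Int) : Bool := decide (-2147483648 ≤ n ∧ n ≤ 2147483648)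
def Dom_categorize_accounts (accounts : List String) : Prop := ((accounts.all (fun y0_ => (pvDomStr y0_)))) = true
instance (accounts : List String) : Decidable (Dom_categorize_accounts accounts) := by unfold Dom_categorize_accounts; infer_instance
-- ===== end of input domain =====

-- B replaces A's single-pass elif chain over a mutated dict with one filter pass per category (idiomatic, same cost).
-- ===== PORT A =====
def pvStepA (d : PySem.Dict String (List String)) (account : String) : PySem.Dict String (List String) :=
  if PySem.Str.startswith account "Assets:" then d.modify "Assets" [] (· ++ [account])
  else if PySem.Str.startswith account "Liabilities:" then d.modify "Liabilities" [] (· ++ [account])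
  else if PySem.Str.startswith account "Income:" then d.modify "Income" [] (· ++ [account])
  else if PySem.Str.startswith account "Expenses:" then d.modify "Expenses" [] (· ++ [account])
  else if PySem.Str.startswith account "Equity:" then d.modify "Equity" [] (· ++ [account])
  else d

def categorize_accounts (accounts : List String) : List (String × List String) :=
  (accounts.foldl pvStepA (PySem.Dict.ofList
    [("Assets", []), ("Liabilities", []), ("Income", []), ("Expenses", []), ("Equity", [])])).items

-- ===== PORT B =====
def categorize_accounts_alt (accounts : List String) : List (String × List String) :=
  ["Assets", "Liabilities", "Income", "Expenses", "Equity"].map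
    (fun cat => (cat, accounts.filter (fun a => PySem.Str.startswith a (cat ++ ":"))))

-- ===== PRECONDITION & SPEC =====
def Spec_categorize_accounts (accounts : List String) (out : List (String × List String)) : Prop := out = categorize_accounts_alt accounts
instance (accounts : List String) (out : List (String × List String)) : Decidable (Spec_categorize_accounts accounts out) := by unfold Spec_categorize_accounts; infer_instance

-- ===== CLAIM (what is proved, stated in full; the proofs are below) =====
def Claim_equal_categorize_accounts : Prop := ∀ (accounts : List String), Dom_categorize_accounts accounts → Spec_categorize_accounts accounts (categorize_accounts accounts)

-- ===== LEMMAS AND PROOFS =====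

lemma pv_excl {p q s : List Char} (hpq : ¬ p <+: q) (hqp : ¬ q <+: p)
    (h : p <+: s) : ¬ q <+: s := fun h2 =>
  (List.prefix_or_prefix_of_prefix h h2).elim hpq hqp

lemma pv_sw_excl {p q : String} (hpq : ¬ p.toList <+: q.toList) (hqp : ¬ q.toList <+: p.toList)
    {a : String} (h : PySem.Str.startswith a p = true) : PySem.Str.startswith a q = false := by
  rw [Bool.eq_false_iff]
  simp only [ne_eq, PySem.Str.startswith_eq, PySem.Chars.startswith_iff] at h ⊢
  exact pv_excl hpq hqp h

lemma pv_main (accounts : List String) (la ll li le lq : List String) :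
    (accounts.foldl pvStepA (PySem.Dict.mk
      [("Assets", la), ("Liabilities", ll), ("Income", li), ("Expenses", le), ("Equity", lq)])).items
    = [("Assets", la ++ accounts.filter (fun a => PySem.Str.startswith a "Assets:")),
       ("Liabilities", ll ++ accounts.filter (fun a => PySem.Str.startswith a "Liabilities:")),
       ("Income", li ++ accounts.filter (fun a => PySem.Str.startswith a "Income:")),
       ("Expenses", le ++ accounts.filter (fun a => PySem.Str.startswith a "Expenses:")),
       ("Equity", lq ++ accounts.filter (fun a => PySem.Str.startswith a "Equity:"))] := by
  induction accounts generalizing la ll li le lq with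
  | nil => simp [PySem.Dict.items]
  | cons a rest ih =>
    simp only [List.foldl_cons, pvStepA]
    by_cases h1 : PySem.Str.startswith a "Assets:" = true
    · have e2 := pv_sw_excl (by decide) (by decide) h1 (q := "Liabilities:")
      have e3 := pv_sw_excl (by decide) (by decide) h1 (q := "Income:")
      have e4 := pv_sw_excl (by decide) (by decide) h1 (q := "Expenses:")
      have e5 := pv_sw_excl (by decide) (by decide) h1 (q := "Equity:")
      simp at h1 e2 e3 e4 e5
      simp [h1, e2, e3, e4, e5, PySem.Dict.modify, PySem.Dict.getD, PySem.Dict.get?, PySem.Dict.insert, ih]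
    · by_cases h2 : PySem.Str.startswith a "Liabilities:" = true
      · have e3 := pv_sw_excl (by decide) (by decide) h2 (q := "Income:")
        have e4 := pv_sw_excl (by decide) (by decide) h2 (q := "Expenses:")
        have e5 := pv_sw_excl (by decide) (by decide) h2 (q := "Equity:")
        simp at h1 h2 e3 e4 e5
        simp [h1, h2, e3, e4, e5, PySem.Dict.modify, PySem.Dict.getD, PySem.Dict.get?, PySem.Dict.insert, ih]
      · by_cases h3 : PySem.Str.startswith a "Income:" = true
        · have e4 := pv_sw_excl (by decide) (by decide) h3 (q := "Expenses:")
          have e5 := pv_sw_excl (by decide) (by decide) h3 (q := "Equity:")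
          simp at h1 h2 h3 e4 e5
          simp [h1, h2, h3, e4, e5, PySem.Dict.modify, PySem.Dict.getD, PySem.Dict.get?, PySem.Dict.insert, ih]
        · by_cases h4 : PySem.Str.startswith a "Expenses:" = true
          · have e5 := pv_sw_excl (by decide) (by decide) h4 (q := "Equity:")
            simp at h1 h2 h3 h4 e5
            simp [h1, h2, h3, h4, e5, PySem.Dict.modify, PySem.Dict.getD, PySem.Dict.get?, PySem.Dict.insert, ih]
          · by_cases h5 : PySem.Str.startswith a "Equity:" = true
            · simp at h1 h2 h3 h4 h5
              simp [h1, h2, h3, h4, h5, PySem.Dict.modify, PySem.Dict.getD, PySem.Dict.get?, PySem.Dict.insert, ih]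
            · simp at h1 h2 h3 h4 h5
              simp [h1, h2, h3, h4, h5, ih]

-- ===== VERDICT (by name: the statement is the Claim_ definition above) =====
theorem categorize_accounts_spec : Claim_equal_categorize_accounts := by
  intro accounts _
  show categorize_accounts accounts = categorize_accounts_alt accounts
  unfold categorize_accounts categorize_accounts_alt
  rw [show (PySem.Dict.ofList [("Assets", ([] : List String)), ("Liabilities", []), ("Income", []), ("Expenses", []), ("Equity", [])]) = PySem.Dict.mk [("Assets", []), ("Liabilities", []), ("Income", []), ("Expenses", []), ("Equity", [])] from rfl]
  rw [pv_main]
  simp
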